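-- pv_equiv track=rewrite | github.com/pointw-dev/halchemy | src/python/halchemy/lib/status_codes.py | do_settings_include_status_code
-- ===== SOURCE A (Python) =====
-- def parse_status_code_setting(status_code_setting: str):
--     """
--     Parses a status code setting string into a list of conditions.
--
--     Returns a list of tuples in the form:
--     - ('range', start, end) for range conditions
--     - ('gt', value, None) for greater-than conditions
--     - ('lt', value, None) for less-than conditions
--     - ('gte', value, None) for greater-than-or-equal conditions
--     - ('lte', value, None) for less-than-or-equal conditions
--     - ('eq', value, None) for exact match conditions
--     """
--     parts = status_code_setting.replace(',', ' ').split()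
--     ranges = []
--     for part in parts:
--         part = part.strip()
--         if '-' in part:
--             start, end = map(int, part.split('-'))
--             ranges.append(('range', start, end))
--         elif part.startswith('>='):
--             value = int(part[2:])
--             ranges.append(('gte', value))
--         elif part.startswith('<='):
--             value = int(part[2:])
--             ranges.append(('lte', value))
--         elif part.startswith('>'):
--             value = int(part[1:])
--             ranges.append(('gt', value))
--         elif part.startswith('<'):
--             value = int(part[1:])
--             ranges.append(('lt', value))
--         else:
--             value = int(part)
--             ranges.append(('eq', value))
--     return ranges
--
-- def do_settings_include_status_code(settings: str, status_code: int):
--     """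
--     Determines if a status code is included in the settings.
--
--     :param settings: The status code settings string (e.g., '>=400', '400-403, >404').
--     :param status_code: The status code to check.
--     :return: True if the status code matches the settings, False otherwise.
--     """
--     if settings is None:
--         return False
--
--     included = False
--     range_setting = parse_status_code_setting(settings)
--     for condition, *values in range_setting:
--         if condition == 'range' and values[0] <= status_code <= values[1]:
--             included = True
--         elif condition == 'gt' and status_code > values[0]:
--             included = True
--         elif condition == 'lt' and status_code < values[0]:
--             included = True
--         elif condition == 'gte' and status_code >= values[0]:
--             included = True
--         elif condition == 'lte' and status_code <= values[0]:
--             included = True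
--         elif condition == 'eq' and status_code == values[0]:
--             included = True
--
--     return included
-- ===== SOURCE B (Python) =====
-- def do_settings_include_status_code(settings: str, status_code: int):
--     """Single pass: parse each token and test it inline, returning True on the
--     first match, instead of building an intermediate list of condition tuples."""
--     if settings is None:
--         return False
--     for part in settings.replace(',', ' ').split():
--         if '-' in part:
--             start, end = map(int, part.split('-'))
--             if start <= status_code <= end:
--                 return True
--         elif part.startswith('>='):
--             if status_code >= int(part[2:]):
--                 return True
--         elif part.startswith('<='):
--             if status_code <= int(part[2:]):
--                 return True
--         elif part.startswith('>'):
--             if status_code > int(part[1:]):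
--                 return True
--         elif part.startswith('<'):
--             if status_code < int(part[1:]):
--                 return True
--         elif status_code == int(part):
--             return True
--     return False
-- ===== Notes on version B (the rewrite author's own statement) =====
-- stated objective: simpler
-- what changed: B tests the status code against each token inline in a single loop with an early return on the first match, instead of A's two-phase design that first builds a list of condition tuples and then scans it with an accumulator.
import Mathlib
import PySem

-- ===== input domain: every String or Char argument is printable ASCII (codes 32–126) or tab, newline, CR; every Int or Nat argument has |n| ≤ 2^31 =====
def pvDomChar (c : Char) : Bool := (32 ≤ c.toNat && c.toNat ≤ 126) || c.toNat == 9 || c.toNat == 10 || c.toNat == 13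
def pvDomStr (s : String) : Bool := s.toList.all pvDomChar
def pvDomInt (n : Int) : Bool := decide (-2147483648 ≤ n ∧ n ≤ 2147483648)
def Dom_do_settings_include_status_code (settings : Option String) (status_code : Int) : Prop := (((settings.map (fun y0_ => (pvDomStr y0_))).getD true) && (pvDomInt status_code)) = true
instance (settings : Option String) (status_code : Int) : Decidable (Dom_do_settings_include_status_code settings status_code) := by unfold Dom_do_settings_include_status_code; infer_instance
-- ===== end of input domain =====

-- B replaces A's two-phase (build condition-tuple list, then scan it) design by one
-- loop that parses each token and tests the status code inline, returning on the
-- first match (objective: simpler).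

-- ===== PORT A =====

inductive PvCond where
  | range : Int → Int → PvCond
  | gt : Int → PvCond
  | lt : Int → PvCond
  | gte : Int → PvCond
  | lte : Int → PvCond
  | eq : Int → PvCond
deriving DecidableEq, Repr

-- one iteration of parse_status_code_setting's loop; `none` = the int()/unpacking
-- ValueError (excluded by Pre_); part[2:]/part[1:] with a nonnegative literal index
-- is exactly List.drop on code points
def pvParseTok (part0 : List Char) : Option PvCond :=
  let part := PySem.Chars.strip part0
  if PySem.Chars.isIn ['-'] part then
    match PySem.Chars.splitOn part ['-'] with
    | [a, b] =>
      match PySem.Int.ofChars? a, PySem.Int.ofChars? b with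
      | some s, some e => some (.range s e)
      | _, _ => none
    | _ => none
  else if PySem.Chars.startswith part ['>', '='] then (PySem.Int.ofChars? (part.drop 2)).map .gte
  else if PySem.Chars.startswith part ['<', '='] then (PySem.Int.ofChars? (part.drop 2)).map .lte
  else if PySem.Chars.startswith part ['>'] then (PySem.Int.ofChars? (part.drop 1)).map .gt
  else if PySem.Chars.startswith part ['<'] then (PySem.Int.ofChars? (part.drop 1)).map .lt
  else (PySem.Int.ofChars? part).map .eq

-- one iteration of A's `for condition, *values in range_setting` if/elif chain
def pvCondHit (c : PvCond) (sc : Int) : Bool :=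
  match c with
  | .range a b => decide (a ≤ sc ∧ sc ≤ b)
  | .gt v => decide (sc > v)
  | .lt v => decide (sc < v)
  | .gte v => decide (sc ≥ v)
  | .lte v => decide (sc ≤ v)
  | .eq v => decide (sc = v)

def do_settings_include_status_code (settings : Option String) (status_code : Int) : Bool :=
  match settings with
  | none => false
  | some s =>
    let parts := PySem.Chars.split₀ (PySem.Chars.replace s.toList [','] [' '])
    -- parse_status_code_setting: build the condition list (a failing token raises, see Pre_)
    let range_setting := parts.foldl
      (fun acc p => match pvParseTok p with | some c => acc ++ [c] | none => acc) []
    -- the scanning loop with the `included` accumulator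
    range_setting.foldl (fun included c => if pvCondHit c status_code then true else included) false

-- ===== PORT B =====

-- B's loop body: parse this token inline and test status_code (returns whether the
-- loop would `return True` here; `false` also where int() would raise — see Pre_)
def pvTokHit (p : List Char) (sc : Int) : Bool :=
  if PySem.Chars.isIn ['-'] p then
    match PySem.Chars.splitOn p ['-'] with
    | [a, b] =>
      match PySem.Int.ofChars? a, PySem.Int.ofChars? b with
      | some s, some e => decide (s ≤ sc ∧ sc ≤ e)
      | _, _ => false
    | _ => false
  else if PySem.Chars.startswith p ['>', '='] then
    match PySem.Int.ofChars? (p.drop 2) with | some v => decide (sc ≥ v) | none => false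
  else if PySem.Chars.startswith p ['<', '='] then
    match PySem.Int.ofChars? (p.drop 2) with | some v => decide (sc ≤ v) | none => false
  else if PySem.Chars.startswith p ['>'] then
    match PySem.Int.ofChars? (p.drop 1) with | some v => decide (sc > v) | none => false
  else if PySem.Chars.startswith p ['<'] then
    match PySem.Int.ofChars? (p.drop 1) with | some v => decide (sc < v) | none => false
  else
    match PySem.Int.ofChars? p with | some v => decide (sc = v) | none => false

-- B's for-loop with early `return True`
def pvAltLoop (sc : Int) : List (List Char) → Bool
  | [] => false
  | p :: rest => if pvTokHit p sc then true else pvAltLoop sc rest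

def do_settings_include_status_code_alt (settings : Option String) (status_code : Int) : Bool :=
  match settings with
  | none => false
  | some s =>
    pvAltLoop status_code (PySem.Chars.split₀ (PySem.Chars.replace s.toList [','] [' ']))

-- ===== PRECONDITION & SPEC =====

-- a token A's parser accepts: a '-'-token splitting into exactly two ints, or a
-- (possibly ≥ ≤ > < prefixed) int
def pvValidTok (p : List Char) : Bool :=
  if PySem.Chars.isIn ['-'] p then
    match PySem.Chars.splitOn p ['-'] with
    | [a, b] => (PySem.Int.ofChars? a).isSome && (PySem.Int.ofChars? b).isSome
    | _ => false
  else if PySem.Chars.startswith p ['>', '='] || PySem.Chars.startswith p ['<', '='] then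
    (PySem.Int.ofChars? (p.drop 2)).isSome
  else if PySem.Chars.startswith p ['>'] || PySem.Chars.startswith p ['<'] then
    (PySem.Int.ofChars? (p.drop 1)).isSome
  else (PySem.Int.ofChars? p).isSome

-- Pre_ excludes exactly the settings strings containing a malformed token (an int()
-- ValueError or a '-'-token that does not split into exactly two ints), on which the
-- Python A raises ValueError and returns nothing.
def Pre_do_settings_include_status_code (settings : Option String) (status_code : Int) : Prop :=
  ∀ p ∈ PySem.Chars.split₀ (PySem.Chars.replace ((settings.getD "").toList) [','] [' ']),
    pvValidTok p = true
instance (settings : Option String) (status_code : Int) : Decidable (Pre_do_settings_include_status_code settings status_code) := by unfold Pre_do_settings_include_status_code; infer_instance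

def pvWitness_do_settings_include_status_code : Option String × Int := (some ">=400, 200-203", 201)

def Spec_do_settings_include_status_code (settings : Option String) (status_code : Int) (out : Bool) : Prop := out = do_settings_include_status_code_alt settings status_code
instance (settings : Option String) (status_code : Int) (out : Bool) : Decidable (Spec_do_settings_include_status_code settings status_code out) := by unfold Spec_do_settings_include_status_code; infer_instance

-- ===== CLAIM (what is proved, stated in full; the proofs are below) =====
def Claim_equal_do_settings_include_status_code : Prop := ∀ (settings : Option String) (status_code : Int), Dom_do_settings_include_status_code settings status_code → Pre_do_settings_include_status_code settings status_code → Spec_do_settings_include_status_code settings status_code (do_settings_include_status_code settings status_code)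

-- ===== LEMMAS AND PROOFS =====

-- tokens produced by str.split() contain no whitespace
theorem pv_split₀_go_nows : ∀ (s cur : List Char) (acc : List (List Char)),
    (∀ q ∈ acc, q.all (fun c => !PySem.Chars.isspace c) = true) →
    cur.all (fun c => !PySem.Chars.isspace c) = true →
    ∀ p ∈ PySem.Chars.split₀.go s cur acc, p.all (fun c => !PySem.Chars.isspace c) = true := by
  intro s
  induction s with
  | nil =>
    intro cur acc hacc hcur p hp
    unfold PySem.Chars.split₀.go at hp
    split at hp
    · exact hacc p (by simpa using hp)
    · simp only [List.mem_reverse, List.mem_cons] at hp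
      rcases hp with h | h
      · subst h; simp_all
      · exact hacc p h
  | cons c rest ih =>
    intro cur acc hacc hcur p hp
    unfold PySem.Chars.split₀.go at hp
    by_cases hs : PySem.Chars.isspace c = true
    · rw [if_pos hs] at hp
      split at hp
      · exact ih [] acc hacc (by simp) p hp
      · refine ih [] (cur.reverse :: acc) ?_ (by simp) p hp
        intro q hq
        rcases List.mem_cons.mp hq with h | h
        · subst h; simpa using hcur
        · exact hacc q h
    · rw [if_neg hs] at hp
      refine ih (c :: cur) acc hacc ?_ p hp
      simp [hcur, hs]

theorem pv_strip_eq_self (p : List Char) (h : p.all (fun c => !PySem.Chars.isspace c) = true) :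
    PySem.Chars.strip p = p := by
  unfold PySem.Chars.strip PySem.Chars.lstrip PySem.Chars.rstrip
  have h1 : List.dropWhile PySem.Chars.isspace p = p := by
    rw [List.dropWhile_eq_self_iff]
    intro hl
    have := List.all_eq_true.mp h p[0] (List.getElem_mem hl)
    simpa using this
  rw [h1]
  have h2 : List.dropWhile PySem.Chars.isspace p.reverse = p.reverse := by
    rw [List.dropWhile_eq_self_iff]
    intro hl
    have hm : p.reverse[0] ∈ p := List.mem_reverse.mp (List.getElem_mem hl)
    have := List.all_eq_true.mp h _ hm
    simpa using this
  rw [h2, List.reverse_reverse]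

-- token-level agreement: on a stripped, valid token A's parsed condition tests
-- exactly what B's inline test computes
theorem pv_tok_agree (p : List Char) (sc : Int) (h : PySem.Chars.strip p = p)
    (hv : pvValidTok p = true) :
    ∃ c, pvParseTok p = some c ∧ pvCondHit c sc = pvTokHit p sc := by
  unfold pvParseTok pvTokHit
  unfold pvValidTok at hv
  rw [h]
  by_cases h1 : PySem.Chars.isIn ['-'] p = true
  · simp only [h1, if_true] at hv ⊢
    rcases hs : PySem.Chars.splitOn p ['-'] with _ | ⟨a, _ | ⟨b, _ | ⟨c, t⟩⟩⟩ <;>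
      rw [hs] at hv <;> try simp at hv
    cases ha : PySem.Int.ofChars? a <;> cases hb : PySem.Int.ofChars? b <;>
      simp [ha, hb] at hv ⊢
    simp [pvCondHit]
  · simp only [Bool.not_eq_true] at h1
    simp only [h1, Bool.false_eq_true, if_false] at hv ⊢
    by_cases h2 : PySem.Chars.startswith p ['>', '='] = true
    · simp only [h2, if_true, Bool.true_or] at hv ⊢
      cases hx : PySem.Int.ofChars? (p.drop 2) with
      | none => rw [hx] at hv; simp at hv
      | some v => exact ⟨.gte v, rfl, rfl⟩
    · simp only [Bool.not_eq_true] at h2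
      simp only [h2, Bool.false_eq_true, if_false, Bool.false_or] at hv ⊢
      by_cases h3 : PySem.Chars.startswith p ['<', '='] = true
      · simp only [h3, if_true] at hv ⊢
        cases hx : PySem.Int.ofChars? (p.drop 2) with
        | none => rw [hx] at hv; simp at hv
        | some v => exact ⟨.lte v, rfl, rfl⟩
      · simp only [Bool.not_eq_true] at h3
        simp only [h3, Bool.false_eq_true, if_false] at hv ⊢
        by_cases h4 : PySem.Chars.startswith p ['>'] = true
        · simp only [h4, if_true, Bool.true_or] at hv ⊢
          cases hx : PySem.Int.ofChars? (p.drop 1) with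
          | none => simp only [List.drop_one] at hx hv; rw [hx] at hv; simp at hv
          | some v => exact ⟨.gt v, rfl, rfl⟩
        · simp only [Bool.not_eq_true] at h4
          simp only [h4, Bool.false_eq_true, if_false, Bool.false_or] at hv ⊢
          by_cases h5 : PySem.Chars.startswith p ['<'] = true
          · simp only [h5, if_true] at hv ⊢
            cases hx : PySem.Int.ofChars? (p.drop 1) with
            | none => simp only [List.drop_one] at hx hv; rw [hx] at hv; simp at hv
            | some v => exact ⟨.lt v, rfl, rfl⟩
          · simp only [Bool.not_eq_true] at h5
            simp only [h5, Bool.false_eq_true, if_false] at hv ⊢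
            cases hx : PySem.Int.ofChars? p with
            | none => rw [hx] at hv; simp at hv
            | some v => exact ⟨.eq v, rfl, rfl⟩

-- pointwise-on-members congruence for `any`
theorem pv_any_congr_mem {α : Type} (L : List α) (f g : α → Bool)
    (h : ∀ a ∈ L, f a = g a) : L.any f = L.any g := by
  induction L with
  | nil => rfl
  | cons a rest ih =>
    simp only [List.any_cons, h a (by simp), ih (fun b hb => h b (by simp [hb]))]

-- B's early-return loop is `any`
theorem pv_altLoop_eq_any (sc : Int) (L : List (List Char)) :
    pvAltLoop sc L = L.any (fun p => pvTokHit p sc) := by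
  induction L with
  | nil => rfl
  | cons p rest ih => cases h : pvTokHit p sc <;> simp [pvAltLoop, h, ih]

-- A's condition-list build is a flatMap
theorem pv_build_eq_flatMap (L : List (List Char)) (acc : List PvCond) :
    L.foldl (fun acc p => match pvParseTok p with | some c => acc ++ [c] | none => acc) acc
      = acc ++ L.flatMap (fun p => (pvParseTok p).toList) := by
  induction L generalizing acc with
  | nil => simp
  | cons p rest ih =>
    cases h : pvParseTok p <;> simp [List.foldl_cons, h, ih]

-- A's accumulator scan is `any`
theorem pv_scan_eq_any (sc : Int) (R : List PvCond) (b : Bool) :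
    R.foldl (fun included c => if pvCondHit c sc then true else included) b
      = (b || R.any (fun c => pvCondHit c sc)) := by
  induction R generalizing b with
  | nil => simp
  | cons c rest ih =>
    rw [List.foldl_cons, ih]
    cases h : pvCondHit c sc <;> cases b <;> simp [h]

-- ===== VERDICT (by name: the statement is the Claim_ definition above) =====
theorem do_settings_include_status_code_spec : Claim_equal_do_settings_include_status_code := by
  intro settings status_code _ hpre
  unfold Spec_do_settings_include_status_code
  cases settings with
  | none => rfl
  | some s =>
    show do_settings_include_status_code (some s) status_code
        = do_settings_include_status_code_alt (some s) status_code
    unfold do_settings_include_status_code do_settings_include_status_code_alt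
    simp only
    rw [pv_build_eq_flatMap, pv_scan_eq_any, pv_altLoop_eq_any]
    simp only [List.nil_append, Bool.false_or, List.any_flatMap]
    apply pv_any_congr_mem
    intro p hp
    have hn : p.all (fun c => !PySem.Chars.isspace c) = true :=
      pv_split₀_go_nows _ [] [] (by simp) rfl p hp
    obtain ⟨c, hc, hhit⟩ :=
      pv_tok_agree p status_code (pv_strip_eq_self p hn) (hpre p hp)
    rw [hc]
    simpa using hhit
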